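-- pv_equiv track=rewrite | github.com/KKDD41/Python_EULERS_PROBLEMS | EU_47.py | cool
-- ===== SOURCE A (Python) =====
-- import math
--
-- def p_test(n): # True, if n is prime
--     assert n>1
--     i = 2
--     if n == 2:
--         return True
--     else:
--         while i<=int(math.sqrt(n)):
--             if n%i == 0:
--                 return False
--             i+=1
--     return True
--
-- def cool(n):
--     assert n>0
--     Div = []
--     for i in range(2, n//2+1):
--         if i not in Div and n % i == 0 and p_test(i) == True:
--             Div.append(i)
--         if len(Div)>4:
--             return False
--             break
--     return True if len(Div) == 4 else False
-- ===== SOURCE B (Python) =====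
-- def cool(n):
--     assert n > 0
--     m = n
--     count = 0
--     d = 2
--     while d * d <= m:
--         if m % d == 0:
--             count += 1
--             while m % d == 0:
--                 m //= d
--         else:
--             d += 1
--     if m > 1:
--         count += 1
--     return count == 4
-- ===== Notes on version B (the rewrite author's own statement) =====
-- stated objective: faster
-- what changed: B counts distinct prime factors by trial-division factorization (dividing n down, stopping at sqrt) instead of scanning every i up to n//2 and primality-testing each divisor.
import Mathlib
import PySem

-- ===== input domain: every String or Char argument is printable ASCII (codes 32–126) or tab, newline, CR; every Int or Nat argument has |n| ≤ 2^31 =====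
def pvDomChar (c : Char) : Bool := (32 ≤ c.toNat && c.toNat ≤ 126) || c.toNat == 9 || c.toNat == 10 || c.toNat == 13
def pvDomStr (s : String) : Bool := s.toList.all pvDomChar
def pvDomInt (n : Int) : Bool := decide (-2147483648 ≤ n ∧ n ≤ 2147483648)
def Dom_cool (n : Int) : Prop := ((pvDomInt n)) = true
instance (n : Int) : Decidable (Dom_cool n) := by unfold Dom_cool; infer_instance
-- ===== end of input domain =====

-- B replaces A's scan of every i in [2, n//2] (each primality-tested) by trial-division
-- factorization up to sqrt(m), dividing m down; faster (asymptotic change measured by the check).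

-- ===== PORT A =====
-- int(math.sqrt(n)) is ported as Nat.sqrt n.toNat: exact for 0 ≤ n ≤ 2^31 (the float
-- sqrt error there is far smaller than the distance to the nearest other integer result).
-- The fuel parameter only makes the while-loop total; `Nat.sqrt n.toNat + 1` always suffices.
def pLoop (fuel : Nat) (n : Int) (i : Int) : Bool :=
  match fuel with
  | 0 => true
  | f + 1 =>
    if i ≤ (Nat.sqrt n.toNat : Int) then
      if PySem.Int.mod n i = 0 then false else pLoop f n (i + 1)
    else true

-- p_test(n): assert n > 1 holds at every call site (i ≥ 2)
def p_test (n : Int) : Bool :=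
  if n = 2 then true else pLoop (Nat.sqrt n.toNat + 1) n 2

def coolLoop (n : Int) : List Int → List Int → Bool
  | [], div => div.length == 4
  | i :: rest, div =>
    let div' := if (!div.contains i) && (PySem.Int.mod n i == 0) && (p_test i == true) then
                  div ++ [i] else div
    if div'.length > 4 then false else coolLoop n rest div'

def cool (n : Int) : Bool :=
  -- assert n > 0 : inputs n ≤ 0 raise and are excluded by Pre_cool
  coolLoop n (PySem.List.pyRange 2 (PySem.Int.floordiv n 2 + 1) 1) []

-- ===== PORT B =====
-- inner loop: while m % d == 0: m //= d  (fuel only makes it total; m.toNat always suffices)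
def stripF (fuel : Nat) (d : Int) (m : Int) : Int :=
  match fuel with
  | 0 => m
  | f + 1 =>
    if PySem.Int.mod m d = 0 then stripF f d (PySem.Int.floordiv m d) else m

def stripAll (d m : Int) : Int := stripF m.toNat d m

-- outer loop: while d * d <= m  (fuel only makes it total; n.toNat + 1 always suffices)
def factF (fuel : Nat) (m d count : Int) : Int × Int :=
  match fuel with
  | 0 => (m, count)
  | f + 1 =>
    if d * d ≤ m then
      if PySem.Int.mod m d = 0 then factF f (stripAll d m) d (count + 1)
      else factF f m (d + 1) count
    else (m, count)

def cool_alt (n : Int) : Bool :=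
  -- assert n > 0 : inputs n ≤ 0 raise and are excluded by Pre_cool
  let r := factF (n.toNat + 1) n 2 0
  let count := if 1 < r.1 then r.2 + 1 else r.2
  count == 4

-- ===== PRECONDITION & SPEC =====
-- Pre_cool excludes exactly n ≤ 0, where the 'assert n > 0' in A (and in B) raises AssertionError.
def Pre_cool (n : Int) : Prop := 1 ≤ n
instance (n : Int) : Decidable (Pre_cool n) := by unfold Pre_cool; infer_instance
def pvWitness_cool : Int := 210

def Spec_cool (n : Int) (out : Bool) : Prop := out = cool_alt n
instance (n : Int) (out : Bool) : Decidable (Spec_cool n out) := by unfold Spec_cool; infer_instance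

-- ===== CLAIM (what is proved, stated in full; the proofs are below) =====
def Claim_equal_cool : Prop := ∀ (n : Int), Dom_cool n → Pre_cool n → Spec_cool n (cool n)

-- ===== LEMMAS AND PROOFS =====

-- A's inner primality loop tests every candidate j in [i, sqrt n] (fuel covers the whole range)
theorem pLoop_iff (n : Int) :
    ∀ (f : Nat) (i : Int), (Nat.sqrt n.toNat : Int) < i + f →
    (pLoop f n i = true ↔ ∀ j : Int, i ≤ j → j ≤ (Nat.sqrt n.toNat : Int) → ¬ j ∣ n) := by
  intro f
  induction f with
  | zero =>
    intro i hf
    simp only [pLoop]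
    refine iff_of_true trivial ?_
    intro j hij hjs
    omega
  | succ f ih =>
    intro i hf
    simp only [pLoop]
    by_cases hle : i ≤ (Nat.sqrt n.toNat : Int)
    · rw [if_pos hle]
      by_cases hmod : PySem.Int.mod n i = 0
      · rw [if_pos hmod]
        refine iff_of_false (by simp) ?_
        intro hall
        exact hall i le_rfl hle ((PySem.Int.mod_eq_zero_iff_dvd n i).mp hmod)
      · rw [if_neg hmod, ih (i + 1) (by omega)]
        constructor
        · intro h j hij hjs
          rcases eq_or_lt_of_le hij with h1 | h1
          · subst h1
            intro hdvd
            exact hmod ((PySem.Int.mod_eq_zero_iff_dvd n _).mpr hdvd)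
          · exact h j (by omega) hjs
        · intro h j hij hjs
          exact h j (by omega) hjs
    · rw [if_neg hle]
      refine iff_of_true rfl ?_
      intro j hij hjs
      omega

-- p_test computes Nat primality of its argument (arguments are ≥ 2 at every call site)
theorem p_test_iff (i : Int) (hi : 2 ≤ i) : p_test i = true ↔ Nat.Prime i.toNat := by
  unfold p_test
  by_cases h2 : i = 2
  · subst h2
    rw [if_pos rfl]
    refine iff_of_true rfl ?_
    decide
  · rw [if_neg h2, pLoop_iff i (Nat.sqrt i.toNat + 1) 2 (by omega), Nat.prime_def_le_sqrt]
    have hiN : ((i.toNat : ℕ) : Int) = i := Int.toNat_of_nonneg (by omega)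
    constructor
    · intro h
      refine ⟨by omega, fun a ha has hdvd => ?_⟩
      refine h (a : Int) (by exact_mod_cast ha) (by exact_mod_cast has) ?_
      rw [← hiN]
      exact_mod_cast hdvd
    · rintro ⟨-, h⟩ j hj hjs hdvd
      have hjN : ((j.toNat : ℕ) : Int) = j := Int.toNat_of_nonneg (by omega)
      refine h j.toNat (by omega) (by omega) ?_
      rw [← hiN, ← hjN] at hdvd
      exact_mod_cast hdvd

-- A's main loop with early exit counts the qualifying elements of the remaining range
theorem coolLoop_eq (n : Int) (l div : List Int) (hnd : l.Nodup)
    (hdisj : ∀ i ∈ l, i ∉ div) (hlen : div.length ≤ 4) :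
    coolLoop n l div =
      decide (div.length + l.countP (fun i => (PySem.Int.mod n i == 0) && (p_test i == true)) = 4) := by
  induction l generalizing div with
  | nil =>
    rw [show (coolLoop n [] div) = (div.length == 4) from rfl,
      show ((div.length == 4)) = decide (div.length = 4) from rfl]
    simp only [List.countP_nil, decide_eq_decide]
    omega
  | cons i rest ih =>
    have hci : div.contains i = false := by
      have := hdisj i (by simp)
      simp only [← List.contains_iff_mem] at this
      simpa using this
    have hirest : i ∉ rest := (List.nodup_cons.mp hnd).1
    simp only [coolLoop, hci, Bool.not_false, Bool.true_and, List.countP_cons]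
    by_cases hqt : ((PySem.Int.mod n i == 0) && (p_test i == true)) = true
    · rw [if_pos hqt]
      simp only [hqt, List.length_append, List.length_singleton]
      by_cases h4 : div.length = 4
      · rw [if_pos (by simp; omega)]
        rw [eq_comm, decide_eq_false_iff_not]
        simp only [if_true]
        omega
      · rw [if_neg (by simp; omega)]
        rw [ih (div ++ [i]) (List.nodup_cons.mp hnd).2
          (fun x hx => by
            simp only [List.mem_append, List.mem_singleton]
            rintro (hmem | rfl)
            · exact hdisj x (by simp [hx]) hmem
            · exact hirest hx)
          (by simp; omega)]
        simp only [decide_eq_decide, List.length_append, List.length_cons, List.length_nil, if_true]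
        omega
    · rw [if_neg hqt]
      simp only [Bool.not_eq_true] at hqt
      simp only [hqt]
      rw [if_neg (by simp; omega)]
      rw [ih div (List.nodup_cons.mp hnd).2 (fun x hx => hdisj x (by simp [hx])) hlen]
      simp

-- list count over the range = Finset card
theorem range_count (n : Int) (b : ℕ) (hn : 1 ≤ n) :
    (PySem.List.pyRange 2 (b : Int) 1).countP
        (fun i => (PySem.Int.mod n i == 0) && (p_test i == true)) =
      ((Finset.Ico 2 b).filter (fun p => p ∣ n.toNat ∧ p.Prime)).card := by
  induction b with
  | zero =>
    rw [PySem.List.pyRange_one_eq_nil (by norm_num)]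
    simp
  | succ b ih =>
    rcases Nat.lt_or_ge b 2 with hb | hb
    · rw [PySem.List.pyRange_one_eq_nil (by exact_mod_cast Nat.succ_le_of_lt hb)]
      have : Finset.Ico 2 (b + 1) = ∅ := Finset.Ico_eq_empty (by omega)
      simp [this]
    · rw [show ((b + 1 : ℕ) : Int) = (b : Int) + 1 by push_cast; ring,
        PySem.List.pyRange_one_succ_right (by exact_mod_cast hb),
        List.countP_append, ih, Nat.Ico_succ_right_eq_insert_Ico hb,
        Finset.filter_insert]
      have hbn : ((b : Int)).toNat = b := Int.toNat_natCast b
      have hq : ((PySem.Int.mod n (b:Int) == 0) && (p_test (b:Int) == true)) = true ↔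
          (b ∣ n.toNat ∧ b.Prime) := by
        rw [Bool.and_eq_true, beq_iff_eq, beq_iff_eq,
          PySem.Int.mod_eq_zero_iff_dvd]
        constructor
        · rintro ⟨hdvd, hpt⟩
          have := (p_test_iff (b:Int) (by exact_mod_cast hb)).mp hpt
          rw [hbn] at this
          refine ⟨?_, this⟩
          have hnN : ((n.toNat : ℕ) : Int) = n := Int.toNat_of_nonneg (by omega)
          rw [← hnN] at hdvd
          exact_mod_cast hdvd
        · rintro ⟨hdvd, hp⟩
          refine ⟨?_, (p_test_iff (b:Int) (by exact_mod_cast hb)).mpr (by rwa [hbn])⟩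
          have hnN : ((n.toNat : ℕ) : Int) = n := Int.toNat_of_nonneg (by omega)
          rw [← hnN]
          exact_mod_cast hdvd
      by_cases hcase : b ∣ n.toNat ∧ b.Prime
      · rw [if_pos hcase, Finset.card_insert_of_notMem (by simp [Finset.mem_Ico])]
        simp
        simpa using hq.mpr hcase
      · rw [if_neg hcase]
        simp
        intro hmodz
        rcases Bool.eq_false_or_eq_true (p_test (b:Int)) with ht | hf
        · exact absurd (hq.mp (by simp [hmodz, ht])) hcase
        · exact hf

-- A returns: "number of primes p ≤ n//2 dividing n equals 4"
theorem cool_eq_card (n : Int) (hn : 1 ≤ n) :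
    cool n = decide (((Finset.Ico 2 (n.toNat / 2 + 1)).filter
      (fun p => p ∣ n.toNat ∧ p.Prime)).card = 4) := by
  unfold cool
  have hfd : PySem.Int.floordiv n 2 + 1 = ((n.toNat / 2 + 1 : ℕ) : Int) := by
    rw [PySem.Int.floordiv_eq_ediv_of_pos (by norm_num)]
    push_cast
    omega
  rw [hfd, coolLoop_eq n _ [] (PySem.List.nodup_pyRange_one 2 _) (by simp) (by simp),
    range_count n _ hn]
  simp

-- B's inner loop: with enough fuel it strips every factor d from m
theorem stripF_spec (d : Int) (hd : 2 ≤ d) :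
    ∀ (f : Nat) (m : Int), 0 < m → m.toNat ≤ f →
      0 < stripF f d m ∧ ¬ d ∣ stripF f d m ∧ ∃ k : ℕ, m = d ^ k * stripF f d m := by
  intro f
  induction f with
  | zero => intro m hm hf; omega
  | succ f ih =>
    intro m hm hf
    simp only [stripF]
    by_cases hmod : PySem.Int.mod m d = 0
    · rw [if_pos hmod]
      have hdvd : d ∣ m := (PySem.Int.mod_eq_zero_iff_dvd m d).mp hmod
      have hfe : PySem.Int.floordiv m d = m / d := PySem.Int.floordiv_eq_ediv_of_pos (by omega)
      have hpos : 0 < PySem.Int.floordiv m d := by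
        rw [hfe]; exact Int.ediv_pos_of_pos_of_dvd hm (by omega) hdvd
      have hlt : PySem.Int.floordiv m d < m := by
        rw [hfe]
        exact Int.ediv_lt_of_lt_mul (by omega) (lt_mul_of_one_lt_right hm (by omega))
      obtain ⟨hp, hnd, k, hk⟩ := ih (PySem.Int.floordiv m d) hpos (by omega)
      refine ⟨hp, hnd, k + 1, ?_⟩
      have hmd : d * PySem.Int.floordiv m d = m := by
        rw [hfe]; exact Int.mul_ediv_cancel' hdvd
      calc m = d * PySem.Int.floordiv m d := hmd.symm
        _ = d * (d ^ k * stripF f d (PySem.Int.floordiv m d)) := by rw [← hk]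
        _ = d ^ (k + 1) * stripF f d (PySem.Int.floordiv m d) := by ring
    · rw [if_neg hmod]
      exact ⟨hm, fun hdvd => hmod ((PySem.Int.mod_eq_zero_iff_dvd m d).mpr hdvd), 0, by ring⟩

theorem stripAll_spec (d m : Int) (hd : 2 ≤ d) (hm : 0 < m) :
    0 < stripAll d m ∧ ¬ d ∣ stripAll d m ∧ ∃ k : ℕ, m = d ^ k * stripAll d m :=
  stripF_spec d hd m.toNat m hm le_rfl

theorem stripAll_lt (d m : Int) (hd : 2 ≤ d) (hm : 0 < m) (hdvd : d ∣ m) :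
    stripAll d m < m := by
  obtain ⟨hp, hnd, k, hk⟩ := stripAll_spec d m hd hm
  rcases k with _ | k'
  · rw [pow_zero, one_mul] at hk
    exact absurd (hk ▸ hdvd) hnd
  · have hpow : (0:Int) < d ^ k' := pow_pos (by omega) k'
    have hmeq : m = d * (d ^ k' * stripAll d m) := by
      conv_lhs => rw [hk]
      ring
    have ht : stripAll d m ≤ d ^ k' * stripAll d m :=
      le_mul_of_one_le_left (le_of_lt hp) (by omega : (1:Int) ≤ d ^ k')
    nlinarith [hmeq, ht, hp]

-- if no integer in [2, d) divides m and m < d*d then m is prime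
theorem noSmallDiv_prime (m d : Int) (hm : 1 < m) (hd : 2 ≤ d) (hdm : m < d * d)
    (hinv : ∀ e : Int, 2 ≤ e → e < d → ¬ e ∣ m) : m.toNat.Prime := by
  by_contra hnp
  have hmf := Nat.minFac_dvd m.toNat
  have hmfp := Nat.minFac_prime (by omega : m.toNat ≠ 1)
  have hsq : m.toNat.minFac * m.toNat.minFac ≤ m.toNat := by
    have := Nat.minFac_sq_le_self (by omega : 0 < m.toNat) hnp
    nlinarith [this]
  have he2 : 2 ≤ m.toNat.minFac := hmfp.two_le
  have hedvd : (m.toNat.minFac : Int) ∣ m := by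
    have := Int.natCast_dvd_natCast.mpr hmf
    rwa [Int.toNat_of_nonneg (by omega : (0:Int) ≤ m)] at this
  have helt : (m.toNat.minFac : Int) < d := by
    nlinarith [hsq, Int.toNat_of_nonneg (by omega : (0:Int) ≤ m)]
  exact hinv _ (by exact_mod_cast he2) helt hedvd

theorem term_card (m : Int) (hm : 0 < m) (hp : 1 < m → m.toNat.Prime) :
    (m.toNat.primeFactors.card : Int) = if 1 < m then 1 else 0 := by
  rcases eq_or_lt_of_le (show (1:Int) ≤ m by omega) with h1 | h1
  · rw [← h1]
    norm_num
  · rw [if_pos h1, (hp h1).primeFactors]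
    simp

-- B's outer loop invariant: with enough fuel it adds the number of distinct prime factors of m
theorem factF_spec :
    ∀ (f : Nat) (m d count : Int), 0 < m → 2 ≤ d → (m + 1 - d).toNat ≤ f →
      (∀ e : Int, 2 ≤ e → e < d → ¬ e ∣ m) →
      (if 1 < (factF f m d count).1 then (factF f m d count).2 + 1 else (factF f m d count).2) =
        count + (m.toNat.primeFactors.card : Int) := by
  intro f
  induction f with
  | zero =>
    intro m d count hm hd hfuel hinv
    simp only [factF]
    have h2d : 2 * d ≤ d * d := mul_le_mul_of_nonneg_right hd (by omega)
    have hdm : m < d * d := by omega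
    rw [term_card m hm (fun h1 => noSmallDiv_prime m d h1 hd hdm hinv)]
    split_ifs <;> ring
  | succ f ih =>
    intro m d count hm hd hfuel hinv
    simp only [factF]
    have h2d : 2 * d ≤ d * d := mul_le_mul_of_nonneg_right hd (by omega)
    by_cases hguard : d * d ≤ m
    · rw [if_pos hguard]
      by_cases hmod : PySem.Int.mod m d = 0
      · rw [if_pos hmod]
        have hdvdm : d ∣ m := (PySem.Int.mod_eq_zero_iff_dvd m d).mp hmod
        obtain ⟨hp', hnd', k, hk⟩ := stripAll_spec d m hd hm
        have hk1 : k ≠ 0 := by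
          rintro rfl
          rw [pow_zero, one_mul] at hk
          exact hnd' (hk ▸ hdvdm)
        have hm'dvd : stripAll d m ∣ m := by
          refine ⟨d ^ k, ?_⟩
          conv_lhs => rw [hk]
          ring
        have hlt : stripAll d m < m := stripAll_lt d m hd hm hdvdm
        rw [ih (stripAll d m) d (count + 1) hp' hd (by omega)
          (fun e he hed hdv => hinv e he hed (hdv.trans hm'dvd))]
        have hDp : d.toNat.Prime := by
          rw [Nat.prime_def_lt]
          refine ⟨by omega, fun a ha hadvd => ?_⟩
          by_contra hane
          have ha2 : 2 ≤ a := by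
            rcases Nat.lt_or_ge a 2 with h2 | h2
            · interval_cases a
              · simp at hadvd; omega
              · omega
            · exact h2
          have : (a : Int) ∣ m := by
            refine dvd_trans ?_ hdvdm
            exact_mod_cast Int.natCast_dvd_natCast.mpr hadvd |>.trans
              (by rw [Int.toNat_of_nonneg (by omega)])
          exact hinv a (by exact_mod_cast ha2) (by omega) this
        have hMeq : m.toNat = d.toNat ^ k * (stripAll d m).toNat := by
          have : ((d.toNat ^ k * (stripAll d m).toNat : ℕ) : Int) = m := by
            push_cast [Int.toNat_of_nonneg (by omega : (0:Int) ≤ d),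
              Int.toNat_of_nonneg (by omega : (0:Int) ≤ stripAll d m)]
            omega
          omega
        have hDndvd : ¬ d.toNat ∣ (stripAll d m).toNat := by
          intro hdv
          apply hnd'
          have := Int.natCast_dvd_natCast.mpr hdv
          rwa [Int.toNat_of_nonneg (by omega : (0:Int) ≤ d),
            Int.toNat_of_nonneg (by omega : (0:Int) ≤ stripAll d m)] at this
        have hcard : m.toNat.primeFactors.card = (stripAll d m).toNat.primeFactors.card + 1 := by
          rw [hMeq, Nat.primeFactors_mul (pow_ne_zero k (by omega : d.toNat ≠ 0)) (by omega),
            Nat.primeFactors_pow _ hk1, hDp.primeFactors, Finset.singleton_union,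
            Finset.card_insert_of_notMem]
          intro hmem
          exact hDndvd (Nat.dvd_of_mem_primeFactors hmem)
        rw [hcard]; push_cast; ring
      · rw [if_neg hmod]
        apply ih m (d + 1) count hm (by omega) (by omega)
        intro e he hed
        rcases lt_or_eq_of_le (by omega : e ≤ d) with h1 | h1
        · exact hinv e he h1
        · subst h1
          intro hdv
          exact hmod ((PySem.Int.mod_eq_zero_iff_dvd m e).mpr hdv)
    · rw [if_neg hguard]
      rw [term_card m hm (fun h1 => noSmallDiv_prime m d h1 hd (by omega) hinv)]
      split_ifs <;> ring

theorem cool_alt_eq_card (n : Int) (hn : 1 ≤ n) :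
    cool_alt n = decide (n.toNat.primeFactors.card = 4) := by
  have h := factF_spec (n.toNat + 1) n 2 0 (by omega) (by omega) (by omega)
    (fun e he hed => by omega)
  show ((if 1 < (factF (n.toNat + 1) n 2 0).1 then (factF (n.toNat + 1) n 2 0).2 + 1
      else (factF (n.toNat + 1) n 2 0).2) == 4) =
    decide (n.toNat.primeFactors.card = 4)
  rw [h, show ((0 + (n.toNat.primeFactors.card : Int)) == 4) =
    decide ((0 + (n.toNat.primeFactors.card : Int)) = 4) from rfl]
  simp only [decide_eq_decide]
  omega

-- the bridge: restricting to p ≤ N/2 only drops p = N (N prime), which cannot change "= 4"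
theorem card_bridge (N : ℕ) (hN : 1 ≤ N) :
    (((Finset.Ico 2 (N / 2 + 1)).filter (fun p => p ∣ N ∧ p.Prime)).card = 4 ↔
      N.primeFactors.card = 4) := by
  have hset : (Finset.Ico 2 (N / 2 + 1)).filter (fun p => p ∣ N ∧ p.Prime) =
      N.primeFactors.filter (fun p => p ≠ N) := by
    ext p
    simp only [Finset.mem_filter, Finset.mem_Ico, Nat.mem_primeFactors, Nat.lt_succ_iff]
    constructor
    · rintro ⟨⟨h2, hle⟩, hdvd, hp⟩
      have : N / 2 < N := Nat.div_lt_self (by omega) (by omega)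
      exact ⟨⟨hp, hdvd, by omega⟩, by omega⟩
    · rintro ⟨⟨hp, hdvd, -⟩, hne⟩
      refine ⟨⟨hp.two_le, ?_⟩, hdvd, hp⟩
      obtain ⟨c, hc⟩ := hdvd
      have hc1 : c ≠ 1 := by rintro rfl; rw [Nat.mul_one] at hc; exact hne hc.symm
      have hc0 : c ≠ 0 := by rintro rfl; omega
      have h2p : p * 2 ≤ N := by
        calc p * 2 ≤ p * c := Nat.mul_le_mul_left p (by omega)
          _ = N := hc.symm
      exact (Nat.le_div_iff_mul_le (by omega)).mpr h2p
  rw [hset]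
  by_cases hNp : N.Prime
  · rw [hNp.primeFactors, Finset.filter_singleton]
    simp
  · rw [Finset.filter_eq_self.mpr
      (fun p hp => by rintro rfl; exact hNp (Nat.prime_of_mem_primeFactors hp))]

-- ===== VERDICT (by name: the statement is the Claim_ definition above) =====
theorem cool_spec : Claim_equal_cool := by
  intro n _ hn
  have hn : 1 ≤ n := hn
  unfold Spec_cool
  rw [cool_eq_card n hn, cool_alt_eq_card n hn]
  simp only [decide_eq_decide]
  exact card_bridge n.toNat (by omega)
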